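-- pv_equiv track=rewrite | github.com/romanpindela/pa-music-library-pa-python-sample-master-progbasic-python-codecool | music_reports.py | get_genre_stats
-- ===== SOURCE A (Python) =====
-- genre_id = 3
--
-- def get_genre_stats(albums):
--     genre_stats = {}
--     for album in albums:
--         if album[genre_id] in genre_stats:
--             genre_stats[album[genre_id]] = genre_stats[album[genre_id]] + 1
--         else:
--             genre_stats[album[genre_id]] = 1
--     return genre_stats
-- ===== SOURCE B (Python) =====
-- genre_id = 3
--
--
-- def get_genre_stats(albums):
--     genres = [album[genre_id] for album in albums]
--     seen = []
--     for g in genres: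
--         if g not in seen:
--             seen.append(g)
--     return {g: genres.count(g) for g in seen}
-- ===== Notes on version B (the rewrite author's own statement) =====
-- stated objective: alternative
-- what changed: B extracts the genre column, deduplicates it preserving first occurrence, and builds the dict in one comprehension by counting each distinct genre with list.count, instead of A's single pass that increments a dict entry per album.
import Mathlib
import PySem

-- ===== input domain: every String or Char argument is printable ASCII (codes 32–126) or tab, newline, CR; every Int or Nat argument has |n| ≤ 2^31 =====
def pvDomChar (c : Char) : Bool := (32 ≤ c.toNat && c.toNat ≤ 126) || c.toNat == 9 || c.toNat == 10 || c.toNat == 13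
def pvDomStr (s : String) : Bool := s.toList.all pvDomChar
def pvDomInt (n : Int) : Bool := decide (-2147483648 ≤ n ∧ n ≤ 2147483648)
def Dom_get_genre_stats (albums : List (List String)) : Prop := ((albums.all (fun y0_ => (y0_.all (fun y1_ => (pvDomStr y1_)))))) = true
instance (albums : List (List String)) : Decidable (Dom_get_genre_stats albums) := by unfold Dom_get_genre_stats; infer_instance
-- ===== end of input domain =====

-- B rebuilds the genre counts by dedup-then-count over the extracted genre column instead of A's
-- incremental dict accumulation (alternative decomposition, same return value).


-- ===== PORT A =====
-- album[genre_id] is PySem.List.pyGet? album 3; none (= IndexError) is excluded by Pre_ and the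
-- fold then leaves the dict unchanged (unreachable under Pre_).
def get_genre_stats (albums : List (List String)) : List (String × Int) :=
  (albums.foldl (fun d album =>
      match PySem.List.pyGet? album 3 with
      | some g => if d.contains g then d.insert g (d.getD g 0 + 1) else d.insert g 1
      | none => d)
    PySem.Dict.empty).items

-- ===== PORT B =====
-- the comprehension [album[genre_id] for album in albums]; getD "" is unreachable under Pre_
def pvGenres (albums : List (List String)) : List String :=
  albums.map (fun album => (PySem.List.pyGet? album 3).getD "")

def get_genre_stats_alt (albums : List (List String)) : List (String × Int) :=
  let genres := pvGenres albums
  let seen := genres.foldl (fun s g => if s.contains g then s else s ++ [g]) []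
  seen.map (fun g => (g, (genres.count g : Int)))

-- ===== PRECONDITION & SPEC =====
-- Pre_ excludes exactly the inputs where album[3] raises IndexError in A (an album with < 4 fields)
def Pre_get_genre_stats (albums : List (List String)) : Prop :=
  ∀ album ∈ albums, 4 ≤ album.length
instance (albums : List (List String)) : Decidable (Pre_get_genre_stats albums) := by
  unfold Pre_get_genre_stats; infer_instance

def pvWitness_get_genre_stats : List (List String) :=
  [["a", "b", "c", "rock"], ["d", "e", "f", "jazz"], ["g", "h", "i", "rock"]]

def Spec_get_genre_stats (albums : List (List String)) (out : List (String × Int)) : Prop := out = get_genre_stats_alt albums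
instance (albums : List (List String)) (out : List (String × Int)) : Decidable (Spec_get_genre_stats albums out) := by unfold Spec_get_genre_stats; infer_instance

-- ===== CLAIM (what is proved, stated in full; the proofs are below) =====
def Claim_equal_get_genre_stats : Prop := ∀ (albums : List (List String)), Dom_get_genre_stats albums → Pre_get_genre_stats albums → Spec_get_genre_stats albums (get_genre_stats albums)

-- ===== LEMMAS AND PROOFS =====

-- Under Pre_, A's fold over albums is the counting fold over the extracted genre column.
lemma get_genre_stats_fold_eq (albums : List (List String))
    (h : ∀ album ∈ albums, 4 ≤ album.length) (d : PySem.Dict String Int) :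
    albums.foldl (fun d album =>
      match PySem.List.pyGet? album 3 with
      | some g => if d.contains g then d.insert g (d.getD g 0 + 1) else d.insert g 1
      | none => d) d
    = (pvGenres albums).foldl (fun d x => d.insert x (d.getD x 0 + 1)) d := by
  induction albums generalizing d with
  | nil => rfl
  | cons a as ih =>
    have ha : 4 ≤ a.length := h a (List.mem_cons_self ..)
    have h3 : 3 < a.length := by omega
    have hget : PySem.List.pyGet? a 3 = some (a[3]'h3) := by
      rw [show (3 : Int) = ((3 : Nat) : Int) from rfl, PySem.List.pyGet?_natCast]
      simp [List.getElem?_eq_getElem h3]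
    simp only [pvGenres, List.map_cons, List.foldl_cons, hget, Option.getD_some]
    rw [ih (fun b hb => h b (List.mem_cons_of_mem _ hb))]
    congr 1
    by_cases hc : d.contains (a[3]'h3) = true
    · simp [hc]
    · rw [Bool.not_eq_true] at hc
      simp [hc, PySem.Dict.getD_of_not_contains d 0 hc]

theorem get_genre_stats_spec : Claim_equal_get_genre_stats := by
  intro albums _ hpre
  show get_genre_stats albums = get_genre_stats_alt albums
  unfold get_genre_stats get_genre_stats_alt
  rw [get_genre_stats_fold_eq albums hpre,
    PySem.Dict.foldl_insert_getD_add_one_eq_counter, PySem.Dict.items_counter]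
  rfl
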